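-- pv_equiv track=rewrite | github.com/AerysNan/KDVA | tools/split_dataset.py | generate_sample_position
-- ===== SOURCE A (Python) =====
-- def generate_sample_position(sample_count, sample_interval, offset=0):
--     sample_win, total = [1 for _ in range(sample_count)], sample_count
--     while total < sample_interval:
--         for i in range(sample_count):
--             sample_win[i] += 1
--             total += 1
--             if total == sample_interval:
--                 break
--     pos = [offset]
--     for i in range(sample_count - 1):
--         pos.append(pos[-1] + sample_win[i])
--     return pos
-- ===== SOURCE B (Python) =====
-- def generate_sample_position(sample_count, sample_interval, offset=0):
--     if sample_count <= 0:
--         return [offset]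
--     extra = max(sample_interval - sample_count, 0)
--     q, r = divmod(extra, sample_count)
--     base = 1 + q
--     pos_r = offset + (base + 1) * r
--     return list(range(offset, pos_r + 1, base + 1)) + \
--         list(range(pos_r + base, pos_r + base * (sample_count - r - 1) + 1, base))
-- ===== Notes on version B (the rewrite author's own statement) =====
-- stated objective: faster
-- what changed: Replaces the round-robin while-loop that hands out the extra interval units one increment at a time with a closed-form window size (base = 1 + extra//count, plus one for the first extra%count slots) and materialises the positions as two arithmetic ranges instead of an append-one-at-a-time prefix-sum loop.
import Mathlib
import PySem

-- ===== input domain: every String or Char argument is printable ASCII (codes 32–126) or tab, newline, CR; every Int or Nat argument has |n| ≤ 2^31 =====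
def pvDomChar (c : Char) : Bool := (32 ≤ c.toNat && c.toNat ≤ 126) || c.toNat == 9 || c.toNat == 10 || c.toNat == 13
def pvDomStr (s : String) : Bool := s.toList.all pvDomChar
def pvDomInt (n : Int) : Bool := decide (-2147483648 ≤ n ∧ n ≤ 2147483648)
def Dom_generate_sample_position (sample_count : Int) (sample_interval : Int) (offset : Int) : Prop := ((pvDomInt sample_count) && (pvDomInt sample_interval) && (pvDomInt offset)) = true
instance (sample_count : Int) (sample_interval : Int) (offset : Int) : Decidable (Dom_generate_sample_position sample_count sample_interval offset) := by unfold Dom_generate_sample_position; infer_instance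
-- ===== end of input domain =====

-- B replaces A's one-unit-at-a-time round-robin distribution loop with the closed-form
-- window size (base + remainder per slot) and emits the prefix sums directly (objective: faster).

-- ===== PORT A =====
-- inner `for i in range(sample_count): sample_win[i] += 1; total += 1; if total == sample_interval: break`
def pvAFor (win : List Int) (total interval : Int) (i : Nat) : Nat → List Int × Int
  | 0 => (win, total)
  | k + 1 =>
    let win' := win.set i (win.getD i 0 + 1)
    let total' := total + 1
    if total' = interval then (win', total')
    else pvAFor win' total' interval (i + 1) k

-- `while total < sample_interval:` — fuel makes the (otherwise identical) loop total;
-- the fuel passed below suffices on every input admitted by Pre_.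
def pvAWhile (fuel : Nat) (win : List Int) (total interval : Int) (n : Nat) : List Int :=
  match fuel with
  | 0 => win
  | fuel + 1 =>
    if total < interval then
      let p := pvAFor win total interval 0 n
      pvAWhile fuel p.1 p.2 interval n
    else win

-- `pos = [offset]; for i in range(sample_count - 1): pos.append(pos[-1] + sample_win[i])`
def pvAPos (win : List Int) (i : Nat) (pos : List Int) : Nat → List Int
  | 0 => pos
  | k + 1 => pvAPos win (i + 1) (pos ++ [pos.getLastD 0 + win.getD i 0]) k

def generate_sample_position (sample_count : Int) (sample_interval : Int) (offset : Int) : List Int :=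
  let win := List.replicate sample_count.toNat 1
  let total := sample_count
  let win' := pvAWhile ((sample_interval - sample_count).toNat + 1) win total sample_interval sample_count.toNat
  pvAPos win' 0 [offset] (sample_count - 1).toNat

-- ===== PORT B =====
def generate_sample_position_alt (sample_count : Int) (sample_interval : Int) (offset : Int) : List Int :=
  if sample_count ≤ 0 then [offset]
  else
    let extra := max (sample_interval - sample_count) 0
    let q := PySem.Int.floordiv extra sample_count
    let r := PySem.Int.mod extra sample_count
    let base := 1 + q
    let pos_r := offset + (base + 1) * r
    PySem.List.pyRange offset (pos_r + 1) (base + 1) ++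
      PySem.List.pyRange (pos_r + base) (pos_r + base * (sample_count - r - 1) + 1) base

-- ===== PRECONDITION & SPEC =====
-- Pre_ excludes exactly the inputs on which A never returns: for sample_count ≤ 0 the inner
-- for-loop is empty, so the `while total < sample_interval` loop spins forever whenever
-- sample_count < sample_interval.  A returns on every other input.
def Pre_generate_sample_position (sample_count : Int) (sample_interval : Int) (offset : Int) : Prop :=
  0 < sample_count ∨ sample_interval ≤ sample_count
instance (sample_count : Int) (sample_interval : Int) (offset : Int) : Decidable (Pre_generate_sample_position sample_count sample_interval offset) := by unfold Pre_generate_sample_position; infer_instance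
def pvWitness_generate_sample_position : Int × Int × Int := (3, 10, 2)

def Spec_generate_sample_position (sample_count : Int) (sample_interval : Int) (offset : Int) (out : List Int) : Prop := out = generate_sample_position_alt sample_count sample_interval offset
instance (sample_count : Int) (sample_interval : Int) (offset : Int) (out : List Int) : Decidable (Spec_generate_sample_position sample_count sample_interval offset out) := by unfold Spec_generate_sample_position; infer_instance

-- ===== CLAIM (what is proved, stated in full; the proofs are below) =====
def Claim_equal_generate_sample_position : Prop := ∀ (sample_count : Int) (sample_interval : Int) (offset : Int), Dom_generate_sample_position sample_count sample_interval offset → Pre_generate_sample_position sample_count sample_interval offset → Spec_generate_sample_position sample_count sample_interval offset (generate_sample_position sample_count sample_interval offset)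

-- ===== LEMMAS AND PROOFS =====

theorem pv_getD_rep (i : Nat) (a v : Int) (l : List Int) :
    (List.replicate i a ++ v :: l).getD i 0 = v := by
  induction i with
  | zero => rfl
  | succ i ih => simp [List.replicate_succ]

theorem pv_set_rep (i : Nat) (a c v : Int) (l : List Int) :
    (List.replicate i a ++ v :: l).set i c = List.replicate i a ++ c :: l := by
  induction i with
  | zero => rfl
  | succ i ih => simp [List.replicate_succ]

theorem pv_rep_shift (i : Nat) (a : Int) (l : List Int) :
    List.replicate i a ++ a :: l = List.replicate (i + 1) a ++ l := by
  simp [List.replicate_succ' , List.append_assoc]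

theorem pvAFor_spec (k : Nat) : ∀ (i : Nat) (v total m : Int), total < m →
    pvAFor (List.replicate i (v + 1) ++ List.replicate k v) total m i k =
      (if (m - total : Int) < (k : Int) then
        (List.replicate (i + (m - total).toNat) (v + 1) ++ List.replicate (k - (m - total).toNat) v, m)
      else (List.replicate (i + k) (v + 1), total + k)) := by
  induction k with
  | zero =>
    intro i v total m h
    rw [if_neg (by push_cast; omega)]
    simp [pvAFor]
  | succ k ih =>
    intro i v total m h
    rw [List.replicate_succ, pvAFor]
    simp only [pv_getD_rep, pv_set_rep]
    by_cases hb : total + 1 = m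
    · rw [if_pos hb]
      have h1 : (m - total).toNat = 1 := by omega
      by_cases hk : (m - total : Int) < ((k + 1 : Nat) : Int)
      · rw [if_pos hk, pv_rep_shift]
        have e1 : i + (m - total).toNat = i + 1 := by omega
        have e2 : k + 1 - (m - total).toNat = k := by omega
        rw [e1, e2, hb]
      · rw [if_neg hk]
        push_cast at hk
        have hk0 : k = 0 := by omega
        subst hk0
        rw [pv_rep_shift]
        simp only [Prod.mk.injEq, List.replicate_zero, List.append_nil]
        exact ⟨trivial, by push_cast; omega⟩
    · rw [if_neg hb, pv_rep_shift, ih (i + 1) v (total + 1) m (by omega)]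
      by_cases hc : (m - total : Int) < ((k + 1 : Nat) : Int)
      · have hc' : (m - (total + 1) : Int) < (k : Int) := by push_cast at hc ⊢; omega
        rw [if_pos hc, if_pos hc']
        have e1 : i + 1 + (m - (total + 1)).toNat = i + (m - total).toNat := by omega
        have e2 : k - (m - (total + 1)).toNat = k + 1 - (m - total).toNat := by omega
        rw [e1, e2]
      · have hc' : ¬ (m - (total + 1) : Int) < (k : Int) := by push_cast at hc ⊢; omega
        rw [if_neg hc, if_neg hc']
        have e1 : i + 1 + k = i + (k + 1) := by omega
        rw [e1]
        simp only [Prod.mk.injEq]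
        exact ⟨trivial, by push_cast; omega⟩
theorem pvAWhile_stop (fuel : Nat) (win : List Int) (total m : Int) (n : Nat)
    (h : ¬ total < m) : pvAWhile fuel win total m n = win := by
  cases fuel <;> simp [pvAWhile, h]

theorem pvAWhile_spec (fuel : Nat) : ∀ (v total m : Int) (n : Nat), 0 < n →
    (max (m - total) 0).toNat ≤ fuel * n →
    pvAWhile fuel (List.replicate n v) total m n =
      List.replicate ((max (m - total) 0 % (n : Int)).toNat)
          (v + max (m - total) 0 / (n : Int) + 1)
        ++ List.replicate (n - (max (m - total) 0 % (n : Int)).toNat)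
          (v + max (m - total) 0 / (n : Int)) := by
  induction fuel with
  | zero =>
    intro v total m n hn hf
    have hE : max (m - total) 0 = 0 := by omega
    rw [hE]
    simp [pvAWhile]
  | succ fuel ih =>
    intro v total m n hn hf
    by_cases ht : total < m
    · rw [pvAWhile, if_pos ht]
      have hrw : List.replicate n v = List.replicate 0 (v + 1) ++ List.replicate n v := rfl
      rw [hrw, pvAFor_spec n 0 v total m ht]
      have hn' : (0 : Int) < (n : Int) := by exact_mod_cast hn
      by_cases hlt : (m - total : Int) < (n : Int)
      · rw [if_pos hlt]
        have hstop := pvAWhile_stop fuel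
            (List.replicate (0 + (m - total).toNat) (v + 1) ++ List.replicate (n - (m - total).toNat) v)
            m m n (by omega)
        rw [hstop]
        have hE : max (m - total) 0 = m - total := by omega
        rw [hE]
        rw [Int.emod_eq_of_lt (by omega) hlt, Int.ediv_eq_zero_of_lt (by omega) hlt]
        have e1 : 0 + (m - total).toNat = (m - total).toNat := by omega
        rw [e1, add_zero]
      · rw [if_neg hlt]
        have hfe : (fuel + 1) * n = fuel * n + n := by ring
        have hih := ih (v + 1) (total + (n : Int)) m n hn (by omega)
        simp only [Nat.zero_add]
        rw [hih]
        have hE : max (m - total) 0 = max (m - (total + (n:Int))) 0 + 1 * (n : Int) := by omega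
        rw [hE, Int.add_mul_emod_self_right, Int.add_mul_ediv_right _ _ (by omega : (n:Int) ≠ 0)]
        have ev : v + 1 + max (m - (total + (n:Int))) 0 / (n : Int) + 1
            = v + (max (m - (total + (n:Int))) 0 / (n : Int) + 1) + 1 := by ring
        have ev2 : v + 1 + max (m - (total + (n:Int))) 0 / (n : Int)
            = v + (max (m - (total + (n:Int))) 0 / (n : Int) + 1) := by ring
        rw [ev, ev2]
    · rw [pvAWhile_stop _ _ _ _ _ ht]
      have hE : max (m - total) 0 = 0 := by omega
      rw [hE]
      simp
theorem pv_getLastD_map_range (g : Nat → Int) (i : Nat) :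
    ((List.range (i + 1)).map g).getLastD 0 = g i := by
  simp [List.range_succ]

theorem pvAPos_spec (win : List Int) (g : Nat → Int)
    (hg : ∀ j, j + 1 ≤ win.length → g (j + 1) = g j + win.getD j 0) :
    ∀ (k i : Nat), i + k ≤ win.length →
    pvAPos win i ((List.range (i + 1)).map g) k = (List.range (i + k + 1)).map g := by
  intro k
  induction k with
  | zero => intro i h; simp [pvAPos]
  | succ k ih =>
    intro i h
    rw [pvAPos, pv_getLastD_map_range]
    have h1 : g i + win.getD i 0 = g (i + 1) := (hg i (by omega)).symm
    rw [h1]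
    have h2 : (List.range (i + 1)).map g ++ [g (i + 1)] = (List.range (i + 1 + 1)).map g := by
      simp [List.range_succ]
    rw [h2, ih (i + 1) (by omega)]
    congr 2
    omega

theorem pv_getD_rep_append (a b : Nat) (x y : Int) (j : Nat) (h : j < a + b) :
    (List.replicate a x ++ List.replicate b y).getD j 0 = if j < a then x else y := by
  by_cases hj : j < a
  · rw [if_pos hj]
    rw [List.getD_eq_getElem?_getD, List.getElem?_append_left (by simpa using hj)]
    simp [hj]
  · rw [if_neg hj]
    rw [List.getD_eq_getElem?_getD, List.getElem?_append_right (by simpa using hj)]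
    simp only [List.length_replicate]
    rw [List.getElem?_replicate]
    
    rw [if_pos (by omega)]
    rfl

theorem pv_main (n m off : Int) (hpre : Pre_generate_sample_position n m off) :
    generate_sample_position n m off = generate_sample_position_alt n m off := by
  unfold generate_sample_position generate_sample_position_alt
  by_cases hn : n ≤ 0
  · have hm : m ≤ n := by
      rcases hpre with h | h
      · omega
      · exact h
    have h0 : n.toNat = 0 := by omega
    have h1 : (n - 1).toNat = 0 := by omega
    rw [h0, h1, if_pos hn]
    have hstop := pvAWhile_stop ((m - n).toNat + 1) (List.replicate 0 1) n m 0 (by omega)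
    simp only [hstop]
    rfl
  · replace hn : 0 < n := by omega
    rw [if_neg (by omega)]
    have hn' : (0 : Int) < n := hn
    simp only [PySem.Int.floordiv_eq_ediv_of_pos hn', PySem.Int.mod_eq_emod_of_pos hn']
    have hNn : ((n.toNat : Int)) = n := by omega
    have hb : (max (m - n) 0).toNat ≤ ((m - n).toNat + 1) * n.toNat := by
      have h2 : ((m - n).toNat + 1) * n.toNat = (m - n).toNat * n.toNat + n.toNat := by ring
      have h3 : (m - n).toNat ≤ (m - n).toNat * n.toNat + n.toNat := by
        calc (m - n).toNat ≤ (m - n).toNat * 1 + 0 := by omega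
        _ ≤ (m - n).toNat * n.toNat + n.toNat := by
            exact Nat.add_le_add (Nat.mul_le_mul_left _ (by omega)) (by omega)
      omega
    have hwh := pvAWhile_spec ((m - n).toNat + 1) 1 n m n.toNat (by omega) hb
    simp only [hwh]
    rw [hNn]
    set E := max (m - n) 0 with hE
    set Q := E / n with hQ
    set R := E % n with hR
    have hR0 : 0 ≤ R := Int.emod_nonneg _ (by omega)
    have hRn : R < n := Int.emod_lt_of_pos _ hn'
    set g : Nat → Int := fun k => off + (k : Int) * (1 + Q) + min (k : Int) R with hg
    have hlen : (List.replicate R.toNat (1 + Q + 1) ++ List.replicate (n.toNat - R.toNat) (1 + Q)).length = n.toNat := by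
      simp
      omega
    have hgstep : ∀ j, j + 1 ≤ (List.replicate R.toNat (1 + Q + 1) ++ List.replicate (n.toNat - R.toNat) (1 + Q)).length →
        g (j + 1) = g j + (List.replicate R.toNat (1 + Q + 1) ++ List.replicate (n.toNat - R.toNat) (1 + Q)).getD j 0 := by
      intro j hj
      rw [hlen] at hj
      rw [pv_getD_rep_append _ _ _ _ _ (by omega)]
      have hc : ((j + 1 : Nat) : Int) * (1 + Q) = (j : Int) * (1 + Q) + (1 + Q) := by push_cast; ring
      by_cases hjr : j < R.toNat
      · rw [if_pos hjr]
        simp only [hg]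
        rw [hc]
        have : min ((j + 1 : Nat) : Int) R = min (j : Int) R + 1 := by
          push_cast; omega
        rw [this]
        ring
      · rw [if_neg hjr]
        simp only [hg]
        rw [hc]
        have : min ((j + 1 : Nat) : Int) R = min (j : Int) R := by
          push_cast; omega
        rw [this]
        ring
    have hoff : [off] = (List.range (0 + 1)).map g := by
      simp [hg]
      omega
    rw [hoff, pvAPos_spec _ g hgstep (n - 1).toNat 0 (by rw [hlen]; omega)]
    have hRange : 0 + (n - 1).toNat + 1 = n.toNat := by omega
    rw [hRange]
    -- B side: the two arithmetic ranges
    have hQ0 : 0 ≤ Q := Int.ediv_nonneg (by omega) (by omega)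
    have hRt : ((R.toNat : Int)) = R := by omega
    have h1 : PySem.List.pyRange off (off + (1 + Q + 1) * R + 1) (1 + Q + 1)
        = (List.range (R.toNat + 1)).map (fun (k : Nat) => off + (1 + Q + 1) * (k : Int)) := by
      rw [PySem.List.pyRange_of_pos _ _ (by omega : (0:Int) < 1 + Q + 1)]
      rw [if_pos (by nlinarith [mul_nonneg (by omega : (0:Int) ≤ 1 + Q + 1) hR0])]
      have e1 : off + (1 + Q + 1) * R + 1 - off + (1 + Q + 1) - 1 = (1 + Q + 1) * (R + 1) := by ring
      rw [e1, Int.mul_ediv_cancel_left _ (by omega : (1 + Q + 1 : Int) ≠ 0)]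
      have ecnt : (R + 1).toNat = R.toNat + 1 := by omega
      rw [ecnt]
    have h2 : PySem.List.pyRange (off + (1 + Q + 1) * R + (1 + Q))
          (off + (1 + Q + 1) * R + (1 + Q) * (n - R - 1) + 1) (1 + Q)
        = (List.range (n.toNat - R.toNat - 1)).map
            (fun (k : Nat) => off + (1 + Q + 1) * R + (1 + Q) + (1 + Q) * (k : Int)) := by
      rw [PySem.List.pyRange_of_pos _ _ (by omega : (0:Int) < 1 + Q)]
      by_cases hnr : n - R - 1 ≤ 0
      · have hR1 : R = n - 1 := by omega
        rw [if_neg (by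
          have hx : (1 + Q) * (n - R - 1) ≤ 0 := by nlinarith [hQ0, hnr]
          simp only [not_lt]
          linarith [hx, hQ0])]
        have : n.toNat - R.toNat - 1 = 0 := by omega
        rw [this]
      · replace hnr : 1 ≤ n - R - 1 := by omega
        rw [if_pos (by nlinarith [mul_le_mul_of_nonneg_left hnr (by omega : (0:Int) ≤ 1 + Q)])]
        have e2 : off + (1 + Q + 1) * R + (1 + Q) * (n - R - 1) + 1 - (off + (1 + Q + 1) * R + (1 + Q)) + (1 + Q) - 1
            = (1 + Q) * (n - R - 1) := by ring
        rw [e2, Int.mul_ediv_cancel_left _ (by omega : (1 + Q : Int) ≠ 0)]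
        have ecnt2 : (n - R - 1).toNat = n.toNat - R.toNat - 1 := by omega
        rw [ecnt2]
    rw [h1, h2]
    have hsplit : n.toNat = (R.toNat + 1) + (n.toNat - R.toNat - 1) := by omega
    conv_lhs => rw [hsplit]
    rw [List.range_add, List.map_append, List.map_map]
    congr 1
    · apply List.map_congr_left
      intro k hk
      rw [List.mem_range] at hk
      simp only [hg]
      have hmin : min ((k : Nat) : Int) R = (k : Int) := by omega
      rw [hmin]
      ring
    · apply List.map_congr_left
      intro k hk
      rw [List.mem_range] at hk
      simp only [hg, Function.comp]
      have hmin : min (((R.toNat + 1 + k : Nat)) : Int) R = R := by push_cast; omega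
      rw [hmin]
      push_cast
      rw [hRt]
      ring

-- ===== VERDICT (by name: the statement is the Claim_ definition above) =====
theorem generate_sample_position_spec : Claim_equal_generate_sample_position := by
  intro sample_count sample_interval offset _ hpre
  exact pv_main sample_count sample_interval offset hpre
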